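-- pv_equiv track=rewrite | github.com/Panda7122/MusicThumbnailGenerator | getDataset/amt/src/model/ops.py | adjust_b_to_gcd
-- ===== SOURCE A (Python) =====
-- import math
--
-- def adjust_b_to_gcd(a, b, min_gcd=16):
--     """
--     Adjust the value of b to ensure the GCD(a, b) is at least min_gcd with minimum change to b.
--
--     Parameters:
--     - a (int): A positive integer
--     - b (int): A positive integer
--     - min_gcd (int): The minimum desired GCD
--
--     Returns:
--     - int: The adjusted value of b
--     """
--     current_gcd = math.gcd(a, b)
--
--     # If current GCD is already greater than or equal to min_gcd, return b as it is.
--     if current_gcd >= min_gcd: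
--         return b
--
--     # If a is less than min_gcd, then it's impossible to get a GCD of at least min_gcd.
--     if a < min_gcd:
--         raise ValueError("a must be at least as large as min_gcd.")
--
--     # Adjust b by trying increments and decrements, preferring the smallest absolute change.
--     adjusted_b_up = b
--     adjusted_b_down = b
--
--     while True:
--         adjusted_b_up += 1
--         adjusted_b_down -= 1
--
--         if math.gcd(a, adjusted_b_up) >= min_gcd:
--             return adjusted_b_up
--         elif math.gcd(a, adjusted_b_down) >= min_gcd:
--             return adjusted_b_down
-- ===== SOURCE B (Python) =====
-- import math
--
-- def adjust_b_to_gcd(a, b, min_gcd=16):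
--     # Divisor enumeration instead of step-by-step search: collect the divisors of a
--     # that are >= min_gcd (in O(sqrt(a))), then jump directly to the nearest multiple
--     # of any such divisor above and below b; ties go up, as in the original.
--     if math.gcd(a, b) >= min_gcd:
--         return b
--     if a < min_gcd:
--         raise ValueError("a must be at least as large as min_gcd.")
--     divs = []
--     for d in range(1, math.isqrt(a) + 1):
--         if a % d == 0:
--             if d >= min_gcd:
--                 divs.append(d)
--             if a // d >= min_gcd:
--                 divs.append(a // d)
--     up = min(b + (d - b % d) for d in divs)
--     down = max(b - b % d for d in divs)
--     return up if up - b <= b - down else down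
-- ===== Notes on version B (the rewrite author's own statement) =====
-- stated objective: faster
-- what changed: Replaces the step-by-step outward search (testing gcd at b±1, b±2, ... until it succeeds) by enumerating the divisors of a that are >= min_gcd in O(sqrt(a)) and jumping directly to the nearest multiple of any such divisor above and below b (ties go up, as in A).
import Mathlib
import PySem

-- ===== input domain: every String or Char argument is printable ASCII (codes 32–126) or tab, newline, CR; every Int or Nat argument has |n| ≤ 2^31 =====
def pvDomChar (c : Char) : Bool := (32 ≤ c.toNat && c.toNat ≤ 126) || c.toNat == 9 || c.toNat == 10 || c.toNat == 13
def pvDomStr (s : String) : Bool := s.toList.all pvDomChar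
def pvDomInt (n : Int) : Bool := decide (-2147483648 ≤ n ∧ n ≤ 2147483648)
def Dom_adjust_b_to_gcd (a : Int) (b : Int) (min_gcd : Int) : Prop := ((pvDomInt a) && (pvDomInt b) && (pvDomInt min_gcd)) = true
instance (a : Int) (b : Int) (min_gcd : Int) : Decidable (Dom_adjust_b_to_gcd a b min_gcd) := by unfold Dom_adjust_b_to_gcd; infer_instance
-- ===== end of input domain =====

-- B replaces A's step-by-step outward search by enumerating the divisors of a that are
-- ≥ min_gcd (O(√a)) and jumping straight to the nearest multiple of any of them (tie up).

-- ===== PORT A =====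
-- the 'while True' loop; the fuel parameter only makes it total — under Pre_ the exit
-- test fires before fuel runs out (proved below), so the 0-case value is never returned
def adjustLoopA (a min_gcd : Int) : Nat → Int → Int → Int
  | 0, up, _ => up
  | n + 1, up, down =>
    let u := up + 1
    let w := down - 1
    if min_gcd ≤ (Int.gcd a u : Int) then u
    else if min_gcd ≤ (Int.gcd a w : Int) then w
    else adjustLoopA a min_gcd n u w

def adjust_b_to_gcd (a : Int) (b : Int) (min_gcd : Int) : Int :=
  if min_gcd ≤ (Int.gcd a b : Int) then b
  else if a < min_gcd then 0  -- Python raises ValueError here; excluded by Pre_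
  else adjustLoopA a min_gcd a.natAbs b b

-- ===== PORT B =====
-- the 'divs' list of Source B: divisors of a that are ≥ min_gcd, found in pairs up to isqrt(a)
def pvDivsB (a min_gcd : Int) : List Int :=
  (PySem.List.pyRange 1 ((a.toNat.sqrt : Int) + 1)).foldl
    (fun acc d =>
      if PySem.Int.mod a d = 0 then
        (if min_gcd ≤ d then acc ++ [d] else acc) ++
          (if min_gcd ≤ PySem.Int.floordiv a d then [PySem.Int.floordiv a d] else [])
      else acc) []

def adjust_b_to_gcd_alt (a : Int) (b : Int) (min_gcd : Int) : Int :=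
  if min_gcd ≤ (Int.gcd a b : Int) then b
  else if a < min_gcd then 0  -- Python raises ValueError here; excluded by Pre_
  else
    match PySem.List.min? ((pvDivsB a min_gcd).map (fun d => b + (d - PySem.Int.mod b d))) (fun x => x),
          PySem.List.max? ((pvDivsB a min_gcd).map (fun d => b - PySem.Int.mod b d)) (fun x => x) with
    | some up, some down => if up - b ≤ b - down then up else down
    | _, _ => 0  -- unreachable: divs is nonempty in this branch (a itself qualifies)

-- ===== PRECONDITION & SPEC =====
-- Pre_ excludes exactly the inputs where A raises ValueError (gcd(a,b) < min_gcd and a < min_gcd);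
-- B raises the same ValueError there.
def Pre_adjust_b_to_gcd (a : Int) (b : Int) (min_gcd : Int) : Prop :=
  min_gcd ≤ (Int.gcd a b : Int) ∨ min_gcd ≤ a
instance (a : Int) (b : Int) (min_gcd : Int) : Decidable (Pre_adjust_b_to_gcd a b min_gcd) := by
  unfold Pre_adjust_b_to_gcd; infer_instance

def pvWitness_adjust_b_to_gcd : Int × Int × Int := (16, 10, 16)

def Spec_adjust_b_to_gcd (a : Int) (b : Int) (min_gcd : Int) (out : Int) : Prop := out = adjust_b_to_gcd_alt a b min_gcd
instance (a : Int) (b : Int) (min_gcd : Int) (out : Int) : Decidable (Spec_adjust_b_to_gcd a b min_gcd out) := by unfold Spec_adjust_b_to_gcd; infer_instance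

-- ===== CLAIM (what is proved, stated in full; the proofs are below) =====
def Claim_equal_adjust_b_to_gcd : Prop := ∀ (a : Int) (b : Int) (min_gcd : Int), Dom_adjust_b_to_gcd a b min_gcd → Pre_adjust_b_to_gcd a b min_gcd → Spec_adjust_b_to_gcd a b min_gcd (adjust_b_to_gcd a b min_gcd)

-- ===== LEMMAS AND PROOFS =====

-- "x would satisfy the loop's exit test": gcd(a, x) ≥ min_gcd
def pvGood (a m x : Int) : Prop := m ≤ (Int.gcd a x : Int)

theorem pvGood_iff (a m x : Int) (ha : 1 ≤ a) (hm : 1 ≤ m) :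
    pvGood a m x ↔ ∃ d : Int, 0 < d ∧ d ∣ a ∧ m ≤ d ∧ d ∣ x := by
  constructor
  · intro h
    unfold pvGood at h
    exact ⟨(Int.gcd a x : Int), by omega, Int.gcd_dvd_left a x, h, Int.gcd_dvd_right a x⟩
  · rintro ⟨d, hd0, hda, hmd, hdx⟩
    have hdn : ((d.toNat : Int)) = d := Int.toNat_of_nonneg (le_of_lt hd0)
    have h1 : (d.toNat : Int) ∣ a := by rw [hdn]; exact hda
    have h2 : (d.toNat : Int) ∣ x := by rw [hdn]; exact hdx
    have hdg : d.toNat ∣ Int.gcd a x := Int.dvd_gcd h1 h2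
    have hpos : 0 < Int.gcd a x := by
      rw [Int.gcd_pos_iff]; left; omega
    have h3 : (d.toNat : Int) ≤ (Int.gcd a x : Int) := by exact_mod_cast Nat.le_of_dvd hpos hdg
    unfold pvGood; omega

-- membership in B's divisor list: exactly the divisors of a that are ≥ min_gcd
theorem pvMem_divs (a m : Int) (ha : 1 ≤ a) (hm : 1 ≤ m) (x : Int) :
    x ∈ pvDivsB a m ↔ (x ∣ a ∧ m ≤ x) := by
  unfold pvDivsB
  have hbody : (fun (acc : List Int) (d : Int) =>
        if PySem.Int.mod a d = 0 then
          (if m ≤ d then acc ++ [d] else acc) ++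
            (if m ≤ PySem.Int.floordiv a d then [PySem.Int.floordiv a d] else [])
        else acc)
      = fun acc d => acc ++
          (if PySem.Int.mod a d = 0 then
            (if m ≤ d then [d] else []) ++
              (if m ≤ PySem.Int.floordiv a d then [PySem.Int.floordiv a d] else [])
          else []) := by
    funext acc d
    split_ifs <;> simp
  rw [hbody, PySem.List.foldl_append_eq_flatMap]
  simp only [List.nil_append, List.mem_flatMap, PySem.List.mem_pyRange_one]
  constructor
  · rintro ⟨d, ⟨hd1, hds⟩, hx⟩
    by_cases hdvd : PySem.Int.mod a d = 0
    · rw [if_pos hdvd] at hx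
      have hda : d ∣ a := (PySem.Int.mod_eq_zero_iff_dvd a d).mp hdvd
      have hfd : PySem.Int.floordiv a d = a / d := PySem.Int.floordiv_eq_ediv_of_pos (by omega)
      rcases List.mem_append.mp hx with hx | hx
      · split_ifs at hx with hmd
        · simp at hx; subst hx; exact ⟨hda, hmd⟩
        · simp at hx
      · split_ifs at hx with hmq
        · simp at hx; subst hx
          rw [hfd] at hmq ⊢
          exact ⟨⟨d, (Int.ediv_mul_cancel hda).symm⟩, hmq⟩
        · simp at hx
    · rw [if_neg hdvd] at hx; simp at hx
  · rintro ⟨hxa, hmx⟩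
    have hx0 : 0 < x := by omega
    have hs2 : a < ((a.toNat.sqrt : Int) + 1) ^ 2 := by
      have h := Nat.lt_succ_sqrt' a.toNat
      have ha' : ((a.toNat : Int)) = a := Int.toNat_of_nonneg (by omega)
      calc a = ((a.toNat : Int)) := ha'.symm
        _ < ((a.toNat.sqrt.succ ^ 2 : Nat) : Int) := by exact_mod_cast h
        _ = ((a.toNat.sqrt : Int) + 1) ^ 2 := by push_cast; ring
    by_cases hxs : x ≤ (a.toNat.sqrt : Int)
    · refine ⟨x, ⟨by omega, by omega⟩, ?_⟩
      rw [if_pos (by rw [PySem.Int.mod_eq_zero_iff_dvd]; exact hxa)]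
      rw [List.mem_append]
      left
      rw [if_pos hmx]
      simp
    · -- x is large: it appears as (a // d) for the cofactor d = a / x
      obtain ⟨k, hk⟩ := hxa
      have hk0 : 0 < k := by
        by_contra h
        push_neg at h
        have h2 := mul_le_mul_of_nonneg_left h (le_of_lt hx0)
        simp at h2
        omega
      have hks : k ≤ (a.toNat.sqrt : Int) := by
        by_contra hks
        push_neg at hks
        have hxl : (a.toNat.sqrt : Int) + 1 ≤ x := by omega
        nlinarith
      refine ⟨k, ⟨by omega, by omega⟩, ?_⟩
      have hka : k ∣ a := ⟨x, by rw [hk]; ring⟩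
      rw [if_pos (by rw [PySem.Int.mod_eq_zero_iff_dvd]; exact hka)]
      have hfd : PySem.Int.floordiv a k = x := by
        rw [PySem.Int.floordiv_eq_ediv_of_pos hk0, hk]
        exact Int.mul_ediv_cancel x (by omega)
      rw [List.mem_append]
      right
      rw [hfd, if_pos hmx]
      simp

-- b - b % d is the greatest multiple of d that is ≤ b
theorem pvDown_spec (b d : Int) (hd : 0 < d) :
    d ∣ (b - PySem.Int.mod b d) ∧ b - PySem.Int.mod b d ≤ b ∧
      ∀ x, x ≤ b → d ∣ x → x ≤ b - PySem.Int.mod b d := by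
  have hmul := PySem.Int.floordiv_mul_add_mod b d
  have h0 := PySem.Int.mod_nonneg b hd
  have h1 := PySem.Int.mod_lt b hd
  have hdvd : d ∣ (b - PySem.Int.mod b d) := ⟨PySem.Int.floordiv b d, by linear_combination -hmul⟩
  refine ⟨hdvd, by omega, ?_⟩
  intro x hx hdx
  by_contra hlt
  push_neg at hlt
  have h2 : d ∣ (x - (b - PySem.Int.mod b d)) := dvd_sub hdx hdvd
  have h3 := Int.le_of_dvd (by omega) h2
  omega

-- b + (d - b % d) is the least multiple of d that is > b
theorem pvUp_spec (b d : Int) (hd : 0 < d) :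
    d ∣ (b + (d - PySem.Int.mod b d)) ∧ b < b + (d - PySem.Int.mod b d) ∧
      ∀ x, b < x → d ∣ x → b + (d - PySem.Int.mod b d) ≤ x := by
  have hmul := PySem.Int.floordiv_mul_add_mod b d
  have h0 := PySem.Int.mod_nonneg b hd
  have h1 := PySem.Int.mod_lt b hd
  have hdvd : d ∣ (b + (d - PySem.Int.mod b d)) := ⟨PySem.Int.floordiv b d + 1, by linear_combination -hmul⟩
  refine ⟨hdvd, by omega, ?_⟩
  intro x hx hdx
  by_contra hlt
  push_neg at hlt
  have h2 : d ∣ (b + (d - PySem.Int.mod b d) - x) := dvd_sub hdvd hdx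
  have h3 := Int.le_of_dvd (by omega) h2
  omega

-- A's loop returns the nearest good value, preferring the upper side on ties
theorem pvLoopA_eq (a m b U D : Int)
    (hU : pvGood a m U) (hUb : b < U) (hUmin : ∀ x, b < x → pvGood a m x → U ≤ x)
    (hD : pvGood a m D) (hDb : D < b) (hDmax : ∀ x, x < b → pvGood a m x → x ≤ D) :
    ∀ (n : Nat) (k : Int), 0 ≤ k →
      (∀ j, b - k ≤ j → j ≤ b + k → ¬ pvGood a m j) →
      (U - b ≤ k + n ∨ b - D ≤ k + n) →
      adjustLoopA a m n (b + k) (b - k) = if U - b ≤ b - D then U else D := by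
  intro n
  induction n with
  | zero =>
    intro k hk hinv hreach
    exfalso
    have h1 : ¬ (U ≤ b + k) := fun h => hinv U (by omega) h hU
    have h2 : ¬ (b - k ≤ D) := fun h => hinv D h (by omega) hD
    omega
  | succ n ih =>
    intro k hk hinv hreach
    show adjustLoopA a m (n + 1) (b + k) (b - k) = _
    rw [adjustLoopA]
    by_cases hPu : pvGood a m (b + k + 1)
    · have hUeq : U = b + k + 1 := by
        have h1 := hUmin (b + k + 1) (by omega) hPu
        have h2 : ¬ (U ≤ b + k) := fun h => hinv U (by omega) h hU
        omega
      have hDle : ¬ (b - k ≤ D) := fun h => hinv D h (by omega) hD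
      have hPu' : m ≤ (Int.gcd a (b + k + 1) : Int) := hPu
      rw [if_pos hPu', if_pos (by omega : U - b ≤ b - D)]
      omega
    · have hPu' : ¬ m ≤ (Int.gcd a (b + k + 1) : Int) := hPu
      by_cases hPw : pvGood a m (b - k - 1)
      · have hDeq : D = b - k - 1 := by
          have h1 := hDmax (b - k - 1) (by omega) hPw
          have h2 : ¬ (b - k ≤ D) := fun h => hinv D h (by omega) hD
          omega
        have hUge : ¬ (U ≤ b + k) := fun h => hinv U (by omega) h hU
        have hUne : U ≠ b + k + 1 := fun h => hPu (h ▸ hU)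
        have hPw' : m ≤ (Int.gcd a (b - k - 1) : Int) := hPw
        rw [if_neg hPu', if_pos hPw', if_neg (by omega : ¬ U - b ≤ b - D)]
        omega
      · have hPw' : ¬ m ≤ (Int.gcd a (b - k - 1) : Int) := hPw
        rw [if_neg hPu', if_neg hPw']
        have e1 : b + k + 1 = b + (k + 1) := by ring
        have e2 : b - k - 1 = b - (k + 1) := by ring
        rw [e1, e2]
        apply ih (k + 1) (by omega)
        · intro j hj1 hj2
          rcases (by omega : j = b + (k + 1) ∨ j = b - (k + 1) ∨ (b - k ≤ j ∧ j ≤ b + k)) with h | h | h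
          · exact h ▸ (e1 ▸ hPu)
          · exact h ▸ (e2 ▸ hPw)
          · exact hinv j h.1 h.2
        · omega

-- ===== VERDICT (by name: the statement is the Claim_ definition above) =====
theorem adjust_b_to_gcd_spec : Claim_equal_adjust_b_to_gcd := by
  intro a b m _ hPre
  unfold Spec_adjust_b_to_gcd adjust_b_to_gcd adjust_b_to_gcd_alt
  by_cases hg : m ≤ (Int.gcd a b : Int)
  · rw [if_pos hg, if_pos hg]
  · rw [if_neg hg, if_neg hg]
    have ham : ¬ a < m := by
      intro h
      rcases hPre with h' | h' <;> omega
    rw [if_neg ham, if_neg ham]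
    have hm1 : 1 ≤ m := by
      have h0 : (0:Int) ≤ (Int.gcd a b : Int) := Int.natCast_nonneg _
      omega
    have ha1 : 1 ≤ a := by omega
    -- a itself is in the divisor list, so both candidate lists are nonempty
    have haMem : a ∈ pvDivsB a m := (pvMem_divs a m ha1 hm1 a).mpr ⟨dvd_refl a, by omega⟩
    have hne : pvDivsB a m ≠ [] := fun h => by simp [h] at haMem
    obtain ⟨up, hupEq⟩ : ∃ u, PySem.List.min? ((pvDivsB a m).map (fun d => b + (d - PySem.Int.mod b d))) (fun x => x) = some u := by
      cases hEq : PySem.List.min? ((pvDivsB a m).map (fun d => b + (d - PySem.Int.mod b d))) (fun x => x) with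
      | none => exact absurd ((PySem.List.min?_eq_none_iff _ _).mp hEq) (by simp [hne])
      | some u => exact ⟨u, rfl⟩
    obtain ⟨down, hdownEq⟩ : ∃ w, PySem.List.max? ((pvDivsB a m).map (fun d => b - PySem.Int.mod b d)) (fun x => x) = some w := by
      cases hEq : PySem.List.max? ((pvDivsB a m).map (fun d => b - PySem.Int.mod b d)) (fun x => x) with
      | none => exact absurd ((PySem.List.max?_eq_none_iff _ _).mp hEq) (by simp [hne])
      | some w => exact ⟨w, rfl⟩
    rw [hupEq, hdownEq]
    -- facts about each divisor
    have hdiv : ∀ d ∈ pvDivsB a m, 0 < d ∧ d ∣ a ∧ m ≤ d := by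
      intro d hd
      have h := (pvMem_divs a m ha1 hm1 d).mp hd
      exact ⟨by omega, h.1, h.2⟩
    -- up is the least good value above b
    have hUmem := PySem.List.min?_mem hupEq
    obtain ⟨du, hduMem, hduEq⟩ := List.mem_map.mp hUmem
    obtain ⟨hdu0, hduA, hduM⟩ := hdiv du hduMem
    obtain ⟨hupDvd, hupGt, hupLeast⟩ := pvUp_spec b du hdu0
    have hUgood : pvGood a m up := by
      rw [pvGood_iff a m up ha1 hm1]
      exact ⟨du, hdu0, hduA, hduM, hduEq ▸ hupDvd⟩
    have hUb : b < up := hduEq ▸ hupGt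
    have hUmin : ∀ x, b < x → pvGood a m x → up ≤ x := by
      intro x hx hgx
      obtain ⟨d, hd0, hdA, hdM, hdX⟩ := (pvGood_iff a m x ha1 hm1).mp hgx
      have hdMem : d ∈ pvDivsB a m := (pvMem_divs a m ha1 hm1 d).mpr ⟨hdA, hdM⟩
      have hcand : b + (d - PySem.Int.mod b d) ∈ (pvDivsB a m).map (fun d => b + (d - PySem.Int.mod b d)) :=
        List.mem_map.mpr ⟨d, hdMem, rfl⟩
      have h1 := PySem.List.min?_isMin hupEq _ hcand
      have h2 := (pvUp_spec b d hd0).2.2 x hx hdX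
      simpa using le_trans h1 h2
    -- down is the greatest good value below b
    have hDmem := PySem.List.max?_mem hdownEq
    obtain ⟨dw, hdwMem, hdwEq⟩ := List.mem_map.mp hDmem
    obtain ⟨hdw0, hdwA, hdwM⟩ := hdiv dw hdwMem
    obtain ⟨hdownDvd, hdownLe, hdownGreatest⟩ := pvDown_spec b dw hdw0
    have hDgood : pvGood a m down := by
      rw [pvGood_iff a m down ha1 hm1]
      exact ⟨dw, hdw0, hdwA, hdwM, hdwEq ▸ hdownDvd⟩
    have hDb : down < b := by
      rcases lt_or_eq_of_le (hdwEq ▸ hdownLe : down ≤ b) with h | h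
      · exact h
      · exfalso
        exact hg (h ▸ hDgood)
    have hDmax : ∀ x, x < b → pvGood a m x → x ≤ down := by
      intro x hx hgx
      obtain ⟨d, hd0, hdA, hdM, hdX⟩ := (pvGood_iff a m x ha1 hm1).mp hgx
      have hdMem : d ∈ pvDivsB a m := (pvMem_divs a m ha1 hm1 d).mpr ⟨hdA, hdM⟩
      have hcand : b - PySem.Int.mod b d ∈ (pvDivsB a m).map (fun d => b - PySem.Int.mod b d) :=
        List.mem_map.mpr ⟨d, hdMem, rfl⟩
      have h1 := PySem.List.max?_isMax hdownEq _ hcand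
      have h2 := (pvDown_spec b d hd0).2.2 x (le_of_lt hx) hdX
      simpa using le_trans h2 h1
    -- the loop is reached before fuel runs out: a multiple of a lies within distance a of b
    have hNat : ((a.natAbs : Int)) = a := Int.natAbs_of_nonneg (by omega)
    have hreach : up - b ≤ (0:Int) + (a.natAbs : Int) := by
      have hcand : b + (a - PySem.Int.mod b a) ∈ (pvDivsB a m).map (fun d => b + (d - PySem.Int.mod b d)) :=
        List.mem_map.mpr ⟨a, haMem, rfl⟩
      have h1 := PySem.List.min?_isMin hupEq _ hcand
      have h2 := PySem.Int.mod_nonneg b (by omega : (0:Int) < a)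
      simp at h1
      omega
    have hloop := pvLoopA_eq a m b up down hUgood hUb hUmin hDgood hDb hDmax a.natAbs 0 (by omega)
      (by intro j hj1 hj2
          have : j = b := by omega
          subst this
          exact hg)
      (by left; omega)
    simpa using hloop
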